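-- pv_equiv track=rewrite | github.com/gregorulm/advent_of_code_2016 | 07/part2.py | findABA
-- ===== SOURCE A (Python) =====
-- def findABA(s, acc):
--
--     if len(s) <= 2:
--         return acc
--
--     else:
--         top = s[0:3]
--         if top[0] == top[2] and top[0] != top[1]:
--             return findABA(s[1:], acc + [top])
--
--         else:
--             return findABA(s[1:], acc)
-- ===== SOURCE B (Python) =====
-- def findABA(s, acc):
--     res = list(acc)
--     for i in range(len(s) - 2):
--         if s[i] == s[i + 2] and s[i] != s[i + 1]:
--             res.append(s[i:i + 3])
--     return res
-- ===== Notes on version B (the rewrite author's own statement) =====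
-- stated objective: faster
-- what changed: Replaced the tail recursion that repeatedly slices the remaining string (each s[1:] copies, O(n^2) total) with one iterative indexed pass appending matches to a list.
import Mathlib
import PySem

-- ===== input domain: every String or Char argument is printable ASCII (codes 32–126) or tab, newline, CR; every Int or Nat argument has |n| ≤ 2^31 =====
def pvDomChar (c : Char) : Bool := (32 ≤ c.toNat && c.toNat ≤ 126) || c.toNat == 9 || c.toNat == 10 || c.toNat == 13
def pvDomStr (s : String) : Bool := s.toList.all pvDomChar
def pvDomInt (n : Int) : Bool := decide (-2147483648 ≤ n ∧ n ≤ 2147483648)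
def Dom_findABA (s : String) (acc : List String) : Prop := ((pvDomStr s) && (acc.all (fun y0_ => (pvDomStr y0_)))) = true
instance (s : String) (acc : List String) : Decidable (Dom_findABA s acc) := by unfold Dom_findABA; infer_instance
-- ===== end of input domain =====

-- B replaces A's slice-and-recurse scan by one iterative indexed pass (asymptotically faster in Python); return values proved equal.

-- ===== PORT A =====
-- A recurses on the string, peeling one character per call; `len(s) <= 2` is exactly
-- the failure of the three-character pattern, so the match on three leading chars is
-- the same branch order. s[0:3] = [a,b,c]; s[1:] = b::c::rest.
def findABAgoA : List Char → List String → List String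
  | a :: b :: c :: rest, acc =>
      if a = c ∧ a ≠ b then findABAgoA (b :: c :: rest) (acc ++ [String.ofList [a, b, c]])
      else findABAgoA (b :: c :: rest) acc
  | _, acc => acc

def findABA (s : String) (acc : List String) : List String :=
  findABAgoA s.toList acc

-- ===== PORT B =====
-- loop body of Source B: s[i], s[i+1], s[i+2] are in range for i < len(s)-2, so getD's
-- default is never used; s[i:i+3] = (l.drop i).take 3 (exact for these in-range indices).
def findABAstep (l : List Char) (res : List String) (i : Nat) : List String :=
  if l.getD i ' ' = l.getD (i + 2) ' ' ∧ l.getD i ' ' ≠ l.getD (i + 1) ' '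
  then res ++ [String.ofList ((l.drop i).take 3)] else res

def findABA_alt (s : String) (acc : List String) : List String :=
  (List.range (s.toList.length - 2)).foldl (findABAstep s.toList) acc

-- ===== PRECONDITION & SPEC =====
def Spec_findABA (s : String) (acc : List String) (out : List String) : Prop := out = findABA_alt s acc
instance (s : String) (acc : List String) (out : List String) : Decidable (Spec_findABA s acc out) := by unfold Spec_findABA; infer_instance

-- ===== CLAIM (what is proved, stated in full; the proofs are below) =====
def Claim_equal_findABA : Prop := ∀ (s : String) (acc : List String), Dom_findABA s acc → Spec_findABA s acc (findABA s acc)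

-- ===== LEMMAS AND PROOFS =====

theorem findABAstep_shift (a : Char) (t : List Char) (res : List String) (i : Nat) :
    findABAstep (a :: t) res (i + 1) = findABAstep t res i := by
  simp [findABAstep]

theorem findABAgoA_eq_fold : ∀ (l : List Char) (acc : List String),
    findABAgoA l acc = (List.range (l.length - 2)).foldl (findABAstep l) acc := by
  intro l
  induction l with
  | nil => intro acc; simp [findABAgoA]
  | cons a t ih =>
    intro acc
    match t with
    | [] => simp [findABAgoA]
    | [b] => simp [findABAgoA]
    | b :: c :: rest =>
      have hlen : (a :: b :: c :: rest).length - 2 = rest.length + 1 := by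
        simp
      rw [hlen, List.range_succ_eq_map, List.foldl_cons, List.foldl_map]
      have hshift : ∀ (res : List String),
          (List.range rest.length).foldl
            (fun r i => findABAstep (a :: b :: c :: rest) r (Nat.succ i)) res
          = (List.range rest.length).foldl (findABAstep (b :: c :: rest)) res := by
        intro res
        simp only [Nat.succ_eq_add_one, findABAstep_shift]
      have hstep0 : findABAstep (a :: b :: c :: rest) acc 0 =
          if a = c ∧ a ≠ b then acc ++ [String.ofList [a, b, c]] else acc := by
        simp [findABAstep]
      have htail : (b :: c :: rest).length - 2 = rest.length := by simp
      rw [hshift, hstep0]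
      by_cases h : a = c ∧ a ≠ b
      · rw [if_pos h]
        rw [show findABAgoA (a :: b :: c :: rest) acc
              = findABAgoA (b :: c :: rest) (acc ++ [String.ofList [a, b, c]]) from by
            conv_lhs => rw [findABAgoA]
            rw [if_pos h]]
        rw [ih, htail]
      · rw [if_neg h]
        rw [show findABAgoA (a :: b :: c :: rest) acc
              = findABAgoA (b :: c :: rest) acc from by
            conv_lhs => rw [findABAgoA]
            rw [if_neg h]]
        rw [ih, htail]

-- ===== VERDICT (by name: the statement is the Claim_ definition above) =====
theorem findABA_spec : Claim_equal_findABA := by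
  intro s acc _
  show findABA s acc = findABA_alt s acc
  rw [findABA, findABA_alt, findABAgoA_eq_fold]
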